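-- pv_equiv track=rewrite | github.com/noumanmunib/advent_of_code_2024 | Day 10/solution.py | dfs
-- ===== SOURCE A (Python) =====
-- def dfs(map_, visited, x, y):
--     """Perform depth-first search to find hiking trails starting from a given position."""
--     stack = [(x, y, 0)]  # (current_x, current_y, current_height)
--     reachable_nines = set()
--
--     while stack:
--         cx, cy, height = stack.pop()
--
--         # Check bounds
--         if cx < 0 or cx >= len(map_) or cy < 0 or cy >= len(map_[0]):
--             continue
--
--         # Check if already visited or height is invalid
--         if visited[cx][cy] or map_[cx][cy] != height:
--             continue
--
--         visited[cx][cy] = True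
--
--         # If we reach height 9, mark it
--         if map_[cx][cy] == 9:
--             reachable_nines.add((cx, cy))
--
--         # Explore neighbors
--         for dx, dy in [(-1, 0), (1, 0), (0, -1), (0, 1)]:
--             stack.append((cx + dx, cy + dy, height + 1))
--
--     return len(reachable_nines)
-- ===== SOURCE B (Python) =====
-- def dfs(map_, visited, x, y):
--     """Perform depth-first search to find hiking trails starting from a given position."""
--     reachable_nines = set()
--
--     def explore(cx, cy, height):
--         if cx < 0 or cx >= len(map_) or cy < 0 or cy >= len(map_[0]):
--             return
--         if visited[cx][cy] or map_[cx][cy] != height: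
--             return
--         visited[cx][cy] = True
--         if map_[cx][cy] == 9:
--             reachable_nines.add((cx, cy))
--         for dx, dy in ((0, 1), (0, -1), (1, 0), (-1, 0)):
--             explore(cx + dx, cy + dy, height + 1)
--
--     explore(x, y, 0)
--     return len(reachable_nines)
-- ===== Notes on version B (the rewrite author's own statement) =====
-- stated objective: alternative
-- what changed: A's explicit stack loop is replaced by a recursive DFS helper that accumulates into a shared reachable-nines set; same DFS, different decomposition (recursion instead of a hand-managed stack).
-- outside the precondition, e.g. on dfs([[0]], [[False, True]], 0, 0): A returns 0, B returns 0
import Mathlib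
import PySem

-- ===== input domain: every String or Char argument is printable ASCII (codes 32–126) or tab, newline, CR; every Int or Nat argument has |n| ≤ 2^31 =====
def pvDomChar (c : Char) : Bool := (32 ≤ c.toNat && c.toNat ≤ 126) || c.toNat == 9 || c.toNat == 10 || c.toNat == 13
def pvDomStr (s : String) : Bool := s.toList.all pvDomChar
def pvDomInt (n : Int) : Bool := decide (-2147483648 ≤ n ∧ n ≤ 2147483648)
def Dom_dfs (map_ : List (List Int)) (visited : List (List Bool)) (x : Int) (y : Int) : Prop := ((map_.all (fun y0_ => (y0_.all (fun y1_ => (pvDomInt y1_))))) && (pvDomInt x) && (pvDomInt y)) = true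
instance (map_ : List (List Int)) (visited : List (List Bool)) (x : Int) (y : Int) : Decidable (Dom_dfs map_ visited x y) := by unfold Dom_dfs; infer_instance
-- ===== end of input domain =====

-- B replaces A's explicit stack loop by a recursive DFS helper threading the same state
-- (objective: alternative decomposition, same cost). In Python both A and B mutate
-- `visited` in place; the equivalence proved here is about the RETURN value.

-- ===== PORT A =====

-- Python's `g[i][j]`, used only after the guards establish 0 ≤ i and 0 ≤ j, so `.toNat`
-- is exact here; `none` = IndexError.
def pvGrid2? {α : Type} (g : List (List α)) (i j : Int) : Option α :=
  (g[i.toNat]?).bind (fun r => r[j.toNat]?)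

-- number of still-unvisited (`false`) cells; it drives termination of both ports
def pvCnt (v : List (List Bool)) : Nat := (v.map (fun r => r.count false)).sum

-- Python's `visited[cx][cy] = True` (only applied with in-range indices)
def pvMark (v : List (List Bool)) (i j : Nat) : List (List Bool) :=
  v.set i ((v.getD i []).set j true)

-- the next four lemmas are needed by the ports' termination argument, so they stay above
theorem count_false_set (r : List Bool) (j : Nat) (h : r[j]? = some false) :
    (r.set j true).count false + 1 = r.count false := by
  induction r generalizing j with
  | nil => simp at h
  | cons a t ih =>
    cases j with
    | zero => simp_all
    | succ j =>
      simp only [List.getElem?_cons_succ] at h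
      simp only [List.set_cons_succ, List.count_cons, ← ih j h]
      omega

theorem pvCnt_set (v : List (List Bool)) (i : Nat) (row r' : List Bool)
    (hr : v[i]? = some row) :
    pvCnt (v.set i r') + row.count false = pvCnt v + r'.count false := by
  induction v generalizing i with
  | nil => simp at hr
  | cons a t ih =>
    cases i with
    | zero =>
      simp only [List.getElem?_cons_zero, Option.some.injEq] at hr
      subst hr
      simp only [List.set_cons_zero, pvCnt, List.map_cons, List.sum_cons]
      omega
    | succ i =>
      simp only [List.getElem?_cons_succ] at hr
      have := ih i hr
      simp only [List.set_cons_succ, pvCnt, List.map_cons, List.sum_cons] at *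
      omega

theorem pvCnt_mark_eq (v : List (List Bool)) (i j : Nat)
    (h : (v[i]?).bind (fun r => r[j]?) = some false) :
    pvCnt (pvMark v i j) + 1 = pvCnt v := by
  obtain ⟨row, hr, hj⟩ := Option.bind_eq_some_iff.mp h
  have hd : v.getD i [] = row := by simp [List.getD, hr]
  unfold pvMark
  rw [hd]
  have h1 := pvCnt_set v i row (row.set j true) hr
  have h2 := count_false_set row j hj
  omega

theorem pvCnt_mark_lt (v : List (List Bool)) (i j : Nat)
    (h : (v[i]?).bind (fun r => r[j]?) = some false) :
    pvCnt (pvMark v i j) < pvCnt v := by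
  have := pvCnt_mark_eq v i j h
  omega

-- A's while-loop: the stack head is Python's list end (pop site); the four pushes appear
-- head-first in Python's pop order (0,1), (0,-1), (1,0), (-1,0).
def dfsLoop (map_ : List (List Int)) :
    List (Int × Int × Int) → List (List Bool) → PySem.Set (Int × Int) → Int
  | [], _, nines => (nines.length : Int)
  | (cx, cy, h) :: rest, visited, nines =>
    if cx < 0 ∨ (map_.length : Int) ≤ cx ∨ cy < 0 ∨ ((map_.headD []).length : Int) ≤ cy then
      dfsLoop map_ rest visited nines
    else
      match hv : pvGrid2? visited cx cy, pvGrid2? map_ cx cy with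
      | some vv, some mv =>
        if hvv : vv = true ∨ mv ≠ h then dfsLoop map_ rest visited nines
        else
          dfsLoop map_
            ((cx, cy + 1, h + 1) :: (cx, cy - 1, h + 1) ::
             (cx + 1, cy, h + 1) :: (cx - 1, cy, h + 1) :: rest)
            (pvMark visited cx.toNat cy.toNat)
            (if mv = 9 then PySem.Set.add nines (cx, cy) else nines)
      | _, _ => dfsLoop map_ rest visited nines
        -- Python raises IndexError here (ragged shapes, excluded by Pre_); we skip the entry
  termination_by stack visited _ => (pvCnt visited, stack.length)
  decreasing_by
  all_goals first
  | exact Prod.Lex.right _ (Nat.lt_succ_self _)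
  | exact Prod.Lex.left _ _ (pvCnt_mark_lt visited cx.toNat cy.toNat (by
      have hvf : vv = false := by rcases vv with _ | _ <;> simp_all
      simpa [pvGrid2?, hvf] using hv))

def dfs (map_ : List (List Int)) (visited : List (List Bool)) (x : Int) (y : Int) : Int :=
  dfsLoop map_ [(x, y, 0)] visited PySem.Set.empty

-- ===== PORT B =====

-- Source B's recursive `explore`, threading (visited, reachable) through the four calls.
-- `fuel` is a totality guard: it only pays for marking a cell, and the top-level call
-- supplies pvCnt visited, which the lemmas below show is always enough (when fuel hits 0
-- every cell is visited, so Python's explore would return at its guard anyway).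
def dfsRec (map_ : List (List Int)) (fuel : Nat) (visited : List (List Bool))
    (nines : PySem.Set (Int × Int)) (cx cy h : Int) :
    List (List Bool) × PySem.Set (Int × Int) :=
  match fuel with
  | 0 => (visited, nines)
  | fuel + 1 =>
    if cx < 0 ∨ (map_.length : Int) ≤ cx ∨ cy < 0 ∨ ((map_.headD []).length : Int) ≤ cy then
      (visited, nines)
    else
      match pvGrid2? visited cx cy, pvGrid2? map_ cx cy with
      | some vv, some mv =>
        if vv = true ∨ mv ≠ h then (visited, nines)
        else
          let v0 := pvMark visited cx.toNat cy.toNat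
          let n0 := if mv = 9 then PySem.Set.add nines (cx, cy) else nines
          let s1 := dfsRec map_ fuel v0 n0 cx (cy + 1) (h + 1)
          let s2 := dfsRec map_ fuel s1.1 s1.2 cx (cy - 1) (h + 1)
          let s3 := dfsRec map_ fuel s2.1 s2.2 (cx + 1) cy (h + 1)
          dfsRec map_ fuel s3.1 s3.2 (cx - 1) cy (h + 1)
      | _, _ => (visited, nines)
        -- Python raises IndexError here (ragged shapes, excluded by Pre_); return unchanged

def dfs_alt (map_ : List (List Int)) (visited : List (List Bool)) (x : Int) (y : Int) : Int :=
  ((dfsRec map_ (pvCnt visited) visited PySem.Set.empty x y 0).2.length : Int)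

-- ===== PRECONDITION & SPEC =====
-- Pre_ excludes ragged inputs (map_ not rectangular, or visited not of map_'s shape) unless
-- the start is already out of bounds (then A returns 0 before indexing anything): on ragged
-- shapes A generally raises IndexError mid-search, though a few such inputs still return
-- when the mismatched cells are never reached.
def Pre_dfs (map_ : List (List Int)) (visited : List (List Bool)) (x : Int) (y : Int) : Prop :=
  (x < 0 ∨ (map_.length : Int) ≤ x ∨ y < 0 ∨ ((map_.headD []).length : Int) ≤ y)
  ∨ ((∀ r ∈ map_, r.length = (map_.headD []).length)
      ∧ visited.length = map_.length
      ∧ (∀ r ∈ visited, r.length = (map_.headD []).length))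
instance (map_ : List (List Int)) (visited : List (List Bool)) (x : Int) (y : Int) : Decidable (Pre_dfs map_ visited x y) := by unfold Pre_dfs; infer_instance

def pvWitness_dfs : List (List Int) × List (List Bool) × Int × Int :=
  ([[0, 1], [1, 9]], [[false, false], [false, false]], 0, 0)

def Spec_dfs (map_ : List (List Int)) (visited : List (List Bool)) (x : Int) (y : Int) (out : Int) : Prop := out = dfs_alt map_ visited x y
instance (map_ : List (List Int)) (visited : List (List Bool)) (x : Int) (y : Int) (out : Int) : Decidable (Spec_dfs map_ visited x y out) := by unfold Spec_dfs; infer_instance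

-- ===== CLAIM (what is proved, stated in full; the proofs are below) =====
def Claim_equal_dfs : Prop := ∀ (map_ : List (List Int)) (visited : List (List Bool)) (x : Int) (y : Int), Dom_dfs map_ visited x y → Pre_dfs map_ visited x y → Spec_dfs map_ visited x y (dfs map_ visited x y)

-- ===== LEMMAS AND PROOFS =====
-- The equivalence is proved input-unconditionally by a simulation argument: popping one
-- stack entry in A and finishing the loop equals running B's recursion on that entry and
-- finishing the loop on the rest of the stack (loop_rec); fuel bookkeeping makes the
-- recursion's fuel irrelevant once it covers the number of unvisited cells.

theorem grid_true_of_cnt_zero (v : List (List Bool)) (i j : Nat) (vv : Bool)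
    (h0 : pvCnt v = 0) (h : (v[i]?).bind (fun r => r[j]?) = some vv) : vv = true := by
  obtain ⟨row, hr, hj⟩ := Option.bind_eq_some_iff.mp h
  have hrow : row ∈ v := List.mem_of_getElem? hr
  have hc : row.count false = 0 := by
    have hm : (row.count false) ∈ v.map (fun r => r.count false) := List.mem_map_of_mem hrow
    have hs : (v.map (fun r => r.count false)).sum = 0 := by simpa [pvCnt] using h0
    have := (List.sum_eq_zero_iff).mp hs _ hm
    exact this
  have hmem : vv ∈ row := List.mem_of_getElem? hj
  rcases vv with _ | _
  · exact absurd hmem (List.count_eq_zero.mp hc)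
  · rfl

theorem cnt_dfsRec_le (map_ : List (List Int)) (fuel : Nat) :
    ∀ (v : List (List Bool)) (n : PySem.Set (Int × Int)) (cx cy h : Int),
      pvCnt (dfsRec map_ fuel v n cx cy h).1 ≤ pvCnt v := by
  induction fuel with
  | zero => intro v n cx cy h; simp [dfsRec]
  | succ fuel ih =>
    intro v n cx cy h
    rw [dfsRec]
    split
    · exact le_refl _
    · split
      · split
        · exact le_refl _
        · rename_i vv mv hv hm hvv
          have hvf : vv = false := by rcases vv with _ | _ <;> simp_all
          have hlt : pvCnt (pvMark v cx.toNat cy.toNat) < pvCnt v :=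
            pvCnt_mark_lt v cx.toNat cy.toNat (by simpa [pvGrid2?, hvf] using hv)
          calc pvCnt _ ≤ _ := ih _ _ _ _ _
            _ ≤ _ := ih _ _ _ _ _
            _ ≤ _ := ih _ _ _ _ _
            _ ≤ _ := ih _ _ _ _ _
            _ ≤ pvCnt v := le_of_lt hlt
      · exact le_refl _

theorem dfsRec_guard (map_ : List (List Int)) (fuel : Nat) (v : List (List Bool))
    (n : PySem.Set (Int × Int)) (cx cy h : Int)
    (hg : cx < 0 ∨ (map_.length : Int) ≤ cx ∨ cy < 0 ∨ ((map_.headD []).length : Int) ≤ cy) :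
    dfsRec map_ fuel v n cx cy h = (v, n) := by
  cases fuel with
  | zero => rfl
  | succ f => rw [dfsRec, if_pos hg]

theorem dfsRec_fuel_succ (map_ : List (List Int)) :
    ∀ (fuel : Nat) (v : List (List Bool)) (n : PySem.Set (Int × Int)) (cx cy h : Int),
      pvCnt v ≤ fuel →
      dfsRec map_ (fuel + 1) v n cx cy h = dfsRec map_ fuel v n cx cy h := by
  intro fuel
  induction fuel with
  | zero =>
    intro v n cx cy h h0
    have hz : pvCnt v = 0 := Nat.le_zero.mp h0
    conv_lhs => rw [dfsRec]
    show (if _ then _ else _) = (v, n)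
    split
    · rfl
    · split
      · rename_i vv mv hv hm
        have hvt : vv = true :=
          grid_true_of_cnt_zero v _ _ vv hz (by simpa [pvGrid2?] using hv)
        rw [if_pos (Or.inl hvt)]
      · rfl
  | succ fuel ih =>
    intro v n cx cy h hle
    conv_lhs => rw [dfsRec]
    conv_rhs => rw [dfsRec]
    split
    · rfl
    · split
      · rename_i hg vv mv hv hm
        split
        · rfl
        · rename_i hvv
          have hvf : vv = false := by rcases vv with _ | _ <;> simp_all
          have hmk : pvCnt (pvMark v cx.toNat cy.toNat) + 1 = pvCnt v :=
            pvCnt_mark_eq v cx.toNat cy.toNat (by simpa [pvGrid2?, hvf] using hv)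
          have h0 : pvCnt (pvMark v cx.toNat cy.toNat) ≤ fuel := by omega
          simp only
          rw [ih _ _ _ _ _ h0]
          rw [ih _ _ _ _ _ (le_trans (cnt_dfsRec_le _ _ _ _ _ _ _) h0)]
          rw [ih _ _ _ _ _ (le_trans (cnt_dfsRec_le _ _ _ _ _ _ _)
            (le_trans (cnt_dfsRec_le _ _ _ _ _ _ _) h0))]
          exact ih _ _ _ _ _ (le_trans (cnt_dfsRec_le _ _ _ _ _ _ _)
            (le_trans (cnt_dfsRec_le _ _ _ _ _ _ _)
              (le_trans (cnt_dfsRec_le _ _ _ _ _ _ _) h0)))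
      · rfl

theorem dfsRec_fuel_eq (map_ : List (List Int)) (fuel : Nat)
    (v : List (List Bool)) (n : PySem.Set (Int × Int)) (cx cy h : Int)
    (hf : pvCnt v ≤ fuel) :
    dfsRec map_ fuel v n cx cy h = dfsRec map_ (pvCnt v) v n cx cy h := by
  induction fuel with
  | zero => have : pvCnt v = 0 := Nat.le_zero.mp hf; rw [this]
  | succ fuel ih =>
    by_cases hc : pvCnt v = fuel + 1
    · rw [hc]
    · have hle : pvCnt v ≤ fuel := by omega
      rw [dfsRec_fuel_succ map_ fuel v n cx cy h hle, ih hle]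

theorem dfsRec_skip (map_ : List (List Int)) (fuel : Nat) (v : List (List Bool))
    (n : PySem.Set (Int × Int)) (cx cy h : Int) (vv : Bool) (mv : Int)
    (hg : ¬(cx < 0 ∨ (map_.length : Int) ≤ cx ∨ cy < 0 ∨ ((map_.headD []).length : Int) ≤ cy))
    (hv : pvGrid2? v cx cy = some vv) (hm : pvGrid2? map_ cx cy = some mv)
    (hs : vv = true ∨ mv ≠ h) :
    dfsRec map_ fuel v n cx cy h = (v, n) := by
  cases fuel with
  | zero => rfl
  | succ f =>
    rw [dfsRec, if_neg hg, hv, hm]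
    show (if vv = true ∨ mv ≠ h then _ else _) = (v, n)
    rw [if_pos hs]

theorem dfsRec_none (map_ : List (List Int)) (fuel : Nat) (v : List (List Bool))
    (n : PySem.Set (Int × Int)) (cx cy h : Int)
    (hg : ¬(cx < 0 ∨ (map_.length : Int) ≤ cx ∨ cy < 0 ∨ ((map_.headD []).length : Int) ≤ cy))
    (hx : pvGrid2? v cx cy = none ∨ pvGrid2? map_ cx cy = none) :
    dfsRec map_ fuel v n cx cy h = (v, n) := by
  cases fuel with
  | zero => rfl
  | succ f =>
    rw [dfsRec, if_neg hg]
    rcases hx with hx | hx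
    · rw [hx]
    · rw [hx]
      rcases hvv : pvGrid2? v cx cy with _ | vv <;> rfl

theorem dfsRec_mark (map_ : List (List Int)) (f : Nat) (v : List (List Bool))
    (n : PySem.Set (Int × Int)) (cx cy h : Int) (vv : Bool) (mv : Int)
    (hg : ¬(cx < 0 ∨ (map_.length : Int) ≤ cx ∨ cy < 0 ∨ ((map_.headD []).length : Int) ≤ cy))
    (hv : pvGrid2? v cx cy = some vv) (hm : pvGrid2? map_ cx cy = some mv)
    (hvv : ¬(vv = true ∨ mv ≠ h)) :
    dfsRec map_ (f + 1) v n cx cy h =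
      (let v0 := pvMark v cx.toNat cy.toNat
       let n0 := if mv = 9 then PySem.Set.add n (cx, cy) else n
       let s1 := dfsRec map_ f v0 n0 cx (cy + 1) (h + 1)
       let s2 := dfsRec map_ f s1.1 s1.2 cx (cy - 1) (h + 1)
       let s3 := dfsRec map_ f s2.1 s2.2 (cx + 1) cy (h + 1)
       dfsRec map_ f s3.1 s3.2 (cx - 1) cy (h + 1)) := by
  rw [dfsRec, if_neg hg, hv, hm]
  show (if vv = true ∨ mv ≠ h then _ else _) = _
  rw [if_neg hvv]

theorem loop_rec_aux (map_ : List (List Int)) :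
    ∀ (k : Nat) (v : List (List Bool)) (n : PySem.Set (Int × Int)) (cx cy h : Int)
      (stack : List (Int × Int × Int)), pvCnt v ≤ k →
    dfsLoop map_ ((cx, cy, h) :: stack) v n =
      dfsLoop map_ stack (dfsRec map_ (pvCnt v) v n cx cy h).1
        (dfsRec map_ (pvCnt v) v n cx cy h).2 := by
  intro k
  induction k with
  | zero =>
    intro v n cx cy h stack h0
    have hz : pvCnt v = 0 := Nat.le_zero.mp h0
    rw [hz]
    conv_lhs => rw [dfsLoop]
    split
    · rfl
    · split
      · rename_i hg x vv mv hv hm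
        split
        · rfl
        · rename_i hvv
          have hvt : vv = true :=
            grid_true_of_cnt_zero v _ _ vv hz (by simpa [pvGrid2?] using hv)
          exact absurd (Or.inl hvt) hvv
      · rfl
  | succ k ih =>
    intro v n cx cy h stack hle
    conv_lhs => rw [dfsLoop]
    split
    · rename_i hg
      rw [dfsRec_guard map_ _ v n cx cy h hg]
    · split
      · rename_i hg x vv mv hv hm
        split
        · rename_i hvv
          rw [dfsRec_skip map_ _ v n cx cy h vv mv hg hv hm hvv]
        · rename_i hvv
          have hvf : vv = false := by rcases vv with _ | _ <;> simp_all
          have hmk : pvCnt (pvMark v cx.toNat cy.toNat) + 1 = pvCnt v :=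
            pvCnt_mark_eq v cx.toNat cy.toNat (by simpa [pvGrid2?, hvf] using hv)
          obtain ⟨m, hm'⟩ : ∃ m, pvCnt v = m + 1 := ⟨pvCnt v - 1, by omega⟩
          have hv0 : pvCnt (pvMark v cx.toNat cy.toNat) = m := by omega
          have hmk2 : m ≤ k := by omega
          rw [hm', dfsRec_mark map_ m v n cx cy h vv mv hg hv hm hvv]
          simp only
          rw [ih _ _ _ _ _ _ (le_trans (le_of_eq hv0) hmk2)]
          rw [hv0]
          rw [ih _ _ _ _ _ _ (le_trans (cnt_dfsRec_le _ _ _ _ _ _ _)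
            (le_trans (le_of_eq hv0) hmk2))]
          rw [dfsRec_fuel_eq map_ m _ _ _ _ _ (le_trans (cnt_dfsRec_le _ _ _ _ _ _ _)
            (le_of_eq hv0))]
          rw [ih _ _ _ _ _ _ (le_trans (cnt_dfsRec_le _ _ _ _ _ _ _)
            (le_trans (cnt_dfsRec_le _ _ _ _ _ _ _) (le_trans (le_of_eq hv0) hmk2)))]
          rw [dfsRec_fuel_eq map_ m _ _ _ _ _ (le_trans (cnt_dfsRec_le _ _ _ _ _ _ _)
            (le_trans (cnt_dfsRec_le _ _ _ _ _ _ _) (le_of_eq hv0)))]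
          rw [ih _ _ _ _ _ _ (le_trans (cnt_dfsRec_le _ _ _ _ _ _ _)
            (le_trans (cnt_dfsRec_le _ _ _ _ _ _ _)
              (le_trans (cnt_dfsRec_le _ _ _ _ _ _ _) (le_trans (le_of_eq hv0) hmk2))))]
          rw [dfsRec_fuel_eq map_ m _ _ _ _ _ (le_trans (cnt_dfsRec_le _ _ _ _ _ _ _)
            (le_trans (cnt_dfsRec_le _ _ _ _ _ _ _)
              (le_trans (cnt_dfsRec_le _ _ _ _ _ _ _) (le_of_eq hv0))))]
      · rename_i hg x hnb
        rcases hx : pvGrid2? v cx cy with _ | vv <;> rcases hy : pvGrid2? map_ cx cy with _ | mv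
        · rw [dfsRec_none map_ _ v n cx cy h hg (Or.inl hx)]
        · rw [dfsRec_none map_ _ v n cx cy h hg (Or.inl hx)]
        · rw [dfsRec_none map_ _ v n cx cy h hg (Or.inr hy)]
        · exact (hnb vv mv hx hy).elim

theorem loop_rec (map_ : List (List Int)) (cx cy h : Int)
    (stack : List (Int × Int × Int)) (v : List (List Bool)) (n : PySem.Set (Int × Int)) :
    dfsLoop map_ ((cx, cy, h) :: stack) v n =
      dfsLoop map_ stack (dfsRec map_ (pvCnt v) v n cx cy h).1
        (dfsRec map_ (pvCnt v) v n cx cy h).2 :=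
  loop_rec_aux map_ (pvCnt v) v n cx cy h stack (le_refl _)

-- ===== VERDICT (by name: the statement is the Claim_ definition above) =====
theorem dfs_spec : Claim_equal_dfs := by
  intro map_ visited x y _ _
  unfold Spec_dfs dfs dfs_alt
  rw [loop_rec]
  simp [dfsLoop]
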